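-- pv_equiv track=rewrite | github.com/danielonsecurity/utms-core | utms/core/hy/utils.py | _format_map
-- ===== SOURCE A (Python) =====
-- def _format_map(content: str, base_indent: int) -> str:
--     """Format map content with proper indentation."""
--     items = content.split()
--     if len(items) <= 4:  # Short maps on one line
--         return f"{{{' '.join(items)}}}"
--
--     lines = ["{"]
--     i = 0
--     while i < len(items):
--         if items[i].startswith(":"):
--             # Key-value pair
--             if i + 1 < len(items):
--                 lines.append(f"  {' '.join(items[i:i+2])}")
--                 i += 2
--             else:
--                 lines.append(f"  {items[i]}")
--                 i += 1
--         else: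
--             lines.append(f"  {items[i]}")
--             i += 1
--     lines.append("}")
--     return "\n".join("  " * base_indent + line for line in lines)
-- ===== SOURCE B (Python) =====
-- def _group(items):
--     """Split the token list into groups: a ':'-key grabs its following value."""
--     if not items:
--         return []
--     if items[0].startswith(":") and len(items) > 1:
--         return [items[:2]] + _group(items[2:])
--     return [[items[0]]] + _group(items[1:])
--
--
-- def _format_map(content: str, base_indent: int) -> str:
--     """Format map content with proper indentation."""
--     items = content.split()
--     if len(items) <= 4:  # Short maps on one line
--         return f"{{{' '.join(items)}}}"
--     lines = ["{"] + ["  " + " ".join(g) for g in _group(items)] + ["}"]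
--     prefix = "  " * base_indent
--     return prefix + ("\n" + prefix).join(lines)
-- ===== Notes on version B (the rewrite author's own statement) =====
-- stated objective: alternative
-- what changed: Replaces A's single index-based while loop that builds indented lines in place by a two-stage decomposition: a recursive grouping pass pairing each ':'-key with its value, then a map+join rendering pass; the indent prefix is factored out of the final join instead of being mapped onto every line.
import Mathlib
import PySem

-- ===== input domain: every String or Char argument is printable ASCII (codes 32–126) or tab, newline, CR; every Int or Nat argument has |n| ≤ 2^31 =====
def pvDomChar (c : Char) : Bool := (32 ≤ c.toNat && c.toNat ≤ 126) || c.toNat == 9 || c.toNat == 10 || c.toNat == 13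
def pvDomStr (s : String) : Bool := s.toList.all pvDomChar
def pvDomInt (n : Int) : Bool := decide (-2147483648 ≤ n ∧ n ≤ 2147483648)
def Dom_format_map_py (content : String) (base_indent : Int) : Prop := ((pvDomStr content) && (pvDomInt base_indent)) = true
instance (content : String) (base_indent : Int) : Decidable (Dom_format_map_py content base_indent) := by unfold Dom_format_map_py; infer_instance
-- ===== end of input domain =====

-- B replaces A's index-based line-building while loop by a two-stage decomposition
-- (recursive token grouping, then a map+join rendering with the indent prefix factored
-- out of the final join); same output, alternative decomposition.

-- ===== PORT A =====
-- A's `while i < len(items)` loop: index i is represented by the suffix items[i:];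
-- the key branch consumes two tokens when a successor exists.
def pvALoop : List String → List String
  | [] => []
  | x :: rest =>
    if PySem.Str.startswith x ":" then
      match rest with
      | [] => ["  " ++ x]
      | y :: rest2 => ("  " ++ x ++ " " ++ y) :: pvALoop rest2
    else ("  " ++ x) :: pvALoop rest

def format_map_py (content : String) (base_indent : Int) : String :=
  let items := PySem.Str.split₀ content
  if items.length ≤ 4 then
    "{" ++ PySem.Str.join " " items ++ "}"
  else
    let lines := ["{"] ++ pvALoop items ++ ["}"]
    PySem.Str.join "\n" (lines.map (fun line => String.ofList (PySem.List.pyRepeat "  ".toList base_indent) ++ line))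

-- ===== PORT B =====
-- B's `_group`: pairs each ':'-key with its following value.
def pvGroup : List String → List (List String)
  | [] => []
  | [x] => [[x]]
  | x :: y :: rest =>
    if PySem.Str.startswith x ":" then [x, y] :: pvGroup rest
    else [x] :: pvGroup (y :: rest)

def format_map_py_alt (content : String) (base_indent : Int) : String :=
  let items := PySem.Str.split₀ content
  if items.length ≤ 4 then
    "{" ++ PySem.Str.join " " items ++ "}"
  else
    let lines := ["{"] ++ (pvGroup items).map (fun g => "  " ++ PySem.Str.join " " g) ++ ["}"]
    let pfx := String.ofList (PySem.List.pyRepeat "  ".toList base_indent)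
    pfx ++ PySem.Str.join ("\n" ++ pfx) lines

-- ===== PRECONDITION & SPEC =====
def Spec_format_map_py (content : String) (base_indent : Int) (out : String) : Prop := out = format_map_py_alt content base_indent
instance (content : String) (base_indent : Int) (out : String) : Decidable (Spec_format_map_py content base_indent out) := by unfold Spec_format_map_py; infer_instance

-- ===== CLAIM =====
def Claim_equal_format_map_py : Prop := ∀ (content : String) (base_indent : Int), Dom_format_map_py content base_indent → Spec_format_map_py content base_indent (format_map_py content base_indent)

-- ===== LEMMAS AND PROOFS =====
-- A's line list equals B's groups rendered.
theorem pvLoop_eq_group : ∀ items : List String,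
    pvALoop items = (pvGroup items).map (fun g => "  " ++ PySem.Str.join " " g) := by
  intro items
  induction hn : items.length using Nat.strong_induction_on generalizing items with
  | _ n ih =>
    match items with
    | [] => rfl
    | [x] =>
      simp [pvALoop, pvGroup, PySem.Str.join, PySem.Chars.join, List.intercalate]
    | x :: y :: rest =>
      subst hn
      by_cases hx : PySem.Chars.startswith x.toList [':'] = true <;>
        simp [pvALoop, pvGroup, hx, PySem.Str.join, PySem.Chars.join,
          ih rest.length (by simp) rest rfl,
          ih (y :: rest).length (by simp) (y :: rest) rfl, List.intercalate]
      try simp [String.ext_iff]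

-- Factoring the common prefix out of a join over a nonempty list.
theorem pvJoin_prefix (p : String) : ∀ (l : String) (ls : List String),
    PySem.Str.join "\n" ((l :: ls).map (fun line => p ++ line))
      = p ++ PySem.Str.join ("\n" ++ p) (l :: ls) := by
  intro l ls
  induction ls generalizing l with
  | nil => simp [PySem.Str.join, PySem.Chars.join, List.intercalate]
  | cons m ms ih =>
    simp only [List.map_cons] at *
    simp [PySem.Str.join, PySem.Chars.join, List.intercalate, String.ext_iff] at *
    simp [ih m]

-- ===== VERDICT =====
theorem format_map_py_spec : Claim_equal_format_map_py := by
  intro content base_indent _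
  simp only [Spec_format_map_py, format_map_py, format_map_py_alt, pvLoop_eq_group]
  split
  · rfl
  · rw [show (["{"] ++ (pvGroup (PySem.Str.split₀ content)).map (fun g => "  " ++ PySem.Str.join " " g) ++ ["}"])
        = "{" :: ((pvGroup (PySem.Str.split₀ content)).map (fun g => "  " ++ PySem.Str.join " " g) ++ ["}"]) from rfl,
      pvJoin_prefix]
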